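-- pv_equiv track=rewrite | github.com/mengzhisuoliu/ladybird | Meta/Generators/generate_window_or_worker_interfaces.py | title_case_to_snake_case
-- ===== SOURCE A (Python) =====
-- def title_case_to_snake_case(value: str) -> str:
--     parts = []
--     for index, character in enumerate(value):
--         if character.isupper() and index > 0:
--             previous_character = value[index - 1]
--             next_character = value[index + 1] if index + 1 < len(value) else ""
--             if previous_character.islower() or (previous_character.isupper() and next_character.islower()):
--                 parts.append("_")
--         parts.append(character.lower())
--     return "".join(parts)
-- ===== SOURCE B (Python) =====
-- def title_case_to_snake_case(value: str) -> str:
--     # pass 1: underscore at every lower->upper boundary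
--     s = "".join(a + "_" * (a.islower() and b.isupper()) for a, b in zip(value, value[1:])) + value[-1:]
--     # pass 2: underscore before the last uppercase of an acronym run (upper, upper, lower)
--     s = "".join(a + "_" * (a.isupper() and b.isupper() and c.islower()) for a, b, c in zip(s, s[1:], s[2:])) + s[-2:]
--     return s.lower()
-- ===== Notes on version B (the rewrite author's own statement) =====
-- stated objective: alternative
-- what changed: A's single index-driven scan with value[index-1]/value[index+1] lookups is replaced by two independent sliding-window substitution passes over adjacent pairs/triples (insert '_' at each lower-to-upper boundary, then before the last uppercase of an acronym run) followed by one final str.lower().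
import Mathlib
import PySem

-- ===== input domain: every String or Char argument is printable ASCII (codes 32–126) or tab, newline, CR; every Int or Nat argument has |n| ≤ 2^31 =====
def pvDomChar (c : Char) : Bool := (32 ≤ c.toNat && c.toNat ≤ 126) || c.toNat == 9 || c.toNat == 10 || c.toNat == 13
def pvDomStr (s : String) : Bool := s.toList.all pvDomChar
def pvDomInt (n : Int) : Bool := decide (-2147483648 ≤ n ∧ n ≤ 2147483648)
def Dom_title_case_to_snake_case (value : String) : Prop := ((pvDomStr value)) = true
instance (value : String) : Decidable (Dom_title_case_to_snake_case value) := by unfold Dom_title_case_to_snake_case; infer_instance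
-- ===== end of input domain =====

-- B replaces A's index-driven scan (with value[index-1]/value[index+1] lookups) by two
-- independent sliding-window passes — insert '_' at every lower→upper boundary, then before
-- the last uppercase of an acronym run — followed by one final lowercasing (objective: alternative).

-- ===== PORT A =====
-- Loop body of A's 'for index, character in enumerate(value)'; value[index-1] is always in
-- range there (guarded by index > 0) so it is ported with pyGetD; Python's next_character is
-- the 1-char string value[index+1] or "" — ported as Option Char, with "".islower() = False
-- becoming (·.map islower).getD false.
def pvStepA (chars : List Char) (parts : List Char) (ic : Int × Char) : List Char :=
  let index := ic.1
  let character := ic.2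
  let parts :=
    if PySem.Chars.isupper character && decide (0 < index) then
      let previous_character := PySem.List.pyGetD chars (index - 1) ' '
      let next_character : Option Char :=
        if index + 1 < (chars.length : Int) then some (PySem.List.pyGetD chars (index + 1) ' ')
        else none
      if PySem.Chars.islower previous_character ||
         (PySem.Chars.isupper previous_character &&
          (next_character.map PySem.Chars.islower).getD false) then
        parts ++ ['_']
      else parts
    else parts
  parts ++ [PySem.Chars.lowerChar character]

def title_case_to_snake_case (value : String) : String :=
  let chars := value.toList
  String.ofList ((PySem.List.enumerate chars).foldl (pvStepA chars) [])

-- ===== PORT B =====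
-- pass 1 of Source B: underscore between every adjacent (lowercase, uppercase) pair
def pvPass1 : List Char → List Char
  | a :: b :: rest =>
      a :: ((if PySem.Chars.islower a && PySem.Chars.isupper b then ['_'] else []) ++
            pvPass1 (b :: rest))
  | rest => rest

-- pass 2 of Source B: underscore between the first two of every (upper, upper, lower) triple
def pvPass2 : List Char → List Char
  | a :: b :: c :: rest =>
      a :: ((if PySem.Chars.isupper a && PySem.Chars.isupper b && PySem.Chars.islower c
             then ['_'] else []) ++
            pvPass2 (b :: c :: rest))
  | rest => rest

def title_case_to_snake_case_alt (value : String) : String :=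
  let s := pvPass1 value.toList
  let s := pvPass2 s
  PySem.Str.lower (String.ofList s)

-- ===== PRECONDITION & SPEC =====
def Spec_title_case_to_snake_case (value : String) (out : String) : Prop := out = title_case_to_snake_case_alt value
instance (value : String) (out : String) : Decidable (Spec_title_case_to_snake_case value out) := by unfold Spec_title_case_to_snake_case; infer_instance

-- ===== CLAIM (what is proved, stated in full; the proofs are below) =====
def Claim_equal_title_case_to_snake_case : Prop := ∀ (value : String), Dom_title_case_to_snake_case value → Spec_title_case_to_snake_case value (title_case_to_snake_case value)

-- ===== LEMMAS AND PROOFS =====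

-- the underscore condition of A at a char c with previous char p and following char n
def pvUnd (p : Option Char) (c : Char) (n : Option Char) : Bool :=
  PySem.Chars.isupper c &&
    (match p with
     | some q => PySem.Chars.islower q ||
                 (PySem.Chars.isupper q && (n.map PySem.Chars.islower).getD false)
     | none => false)

-- reference one-pass form of the result (on char lists, previous char carried along)
def pvRef : Option Char → List Char → List Char
  | _, [] => []
  | p, c :: r =>
      (if pvUnd p c r.head? then ['_'] else []) ++ PySem.Chars.lowerChar c :: pvRef (some c) r

-- pass 1 rephrased per-character with the previous char carried along
def pvG1 : Option Char → List Char → List Char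
  | _, [] => []
  | p, c :: r =>
      (if (p.map PySem.Chars.islower).getD false && PySem.Chars.isupper c then ['_'] else []) ++
      c :: pvG1 (some c) r

-- pass 2 rephrased per-character with the previous char carried along
def pvG2 : Option Char → List Char → List Char
  | _, [] => []
  | p, c :: r =>
      (if (p.map PySem.Chars.isupper).getD false && PySem.Chars.isupper c &&
          (r.head?.map PySem.Chars.islower).getD false then ['_'] else []) ++
      c :: pvG2 (some c) r

theorem pvPass1_eq_g1_cons (r : List Char) : ∀ a, pvPass1 (a :: r) = a :: pvG1 (some a) r := by
  induction r with
  | nil => intro a; simp [pvPass1, pvG1]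
  | cons b r' ih => intro a; simp [pvPass1, pvG1, ih]

theorem pvPass1_eq_g1 (cs : List Char) : pvPass1 cs = pvG1 none cs := by
  cases cs with
  | nil => rfl
  | cons c r => simp [pvPass1_eq_g1_cons, pvG1]

theorem pvPass2_eq_g2_cons (r : List Char) : ∀ a, pvPass2 (a :: r) = a :: pvG2 (some a) r := by
  induction r with
  | nil => intro a; simp [pvPass2, pvG2]
  | cons b r' ih =>
    intro a
    cases r' with
    | nil => simp [pvPass2, pvG2]
    | cons c r'' => simp [pvPass2, pvG2, ih]

theorem pvPass2_eq_g2 (cs : List Char) : pvPass2 cs = pvG2 none cs := by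
  cases cs with
  | nil => rfl
  | cons c r => simp [pvPass2_eq_g2_cons, pvG2]

theorem pv_not_low_of_up {c : Char} (h : PySem.Chars.isupper c = true) :
    PySem.Chars.islower c = false := by
  simp only [PySem.Chars.isupper, PySem.Chars.islower, Char.le_def,
    Bool.and_eq_true, decide_eq_true_eq, Bool.and_eq_false_iff, decide_eq_false_iff_not,
    not_le, UInt32.le_iff_toNat_le, UInt32.lt_iff_toNat_lt] at h ⊢
  have e1 : 'A'.val.toNat = 65 := rfl
  have e2 : 'Z'.val.toNat = 90 := rfl
  have e3 : 'a'.val.toNat = 97 := rfl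
  have e4 : 'z'.val.toNat = 122 := rfl
  rw [e1, e2] at h
  rw [e3, e4]
  omega

-- head of the pass-1 output below an UPPERCASE previous char is the original head
theorem pvG1_head (c : Char) (r : List Char) (h : PySem.Chars.isupper c = true) :
    ((pvG1 (some c) r).head?.map PySem.Chars.islower).getD false =
    ((r.head?.map PySem.Chars.islower).getD false) := by
  cases r with
  | nil => rfl
  | cons d r' => simp [pvG1, pv_not_low_of_up h]

theorem pv_lower_g2_g1 (cs : List Char) :
    ∀ p, PySem.Chars.lower (pvG2 p (pvG1 p cs)) = pvRef p cs := by
  induction cs with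
  | nil => intro p; rfl
  | cons c r ih =>
    intro p
    have ih' := ih (some c)
    simp only [PySem.Chars.lower] at ih' ⊢
    cases p with
    | none =>
      simp [pvG1, pvG2, pvRef, pvUnd, ih']
    | some q =>
      by_cases huc : PySem.Chars.isupper c = true
      · by_cases hlq : PySem.Chars.islower q = true
        · -- pass 1 inserts '_'; A's rule fires through its first disjunct
          simp [pvG1, pvG2, pvRef, pvUnd, hlq, huc, ih',
            pv_not_low_of_up huc, show PySem.Chars.lowerChar '_' = '_' from by decide,
            show PySem.Chars.isupper '_' = false from by decide]
        · -- no pass-1 underscore here; pass 2 sees (q, c, head r)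
          simp only [pvG1, hlq, Bool.false_and, if_false, List.nil_append,
            Option.map_some, Option.getD_some]
          simp [pvG2, pvRef, pvUnd, hlq, huc, ih', pvG1_head c r huc,
            Bool.and_left_comm, Bool.and_comm]
          split <;> simp [show PySem.Chars.lowerChar '_' = '_' from by decide]
      · -- current char not uppercase: neither pass inserts, A's rule is off
        simp [pvG1, pvG2, pvRef, pvUnd, huc, ih']

theorem pvStepA_spec (pre rest : List Char) (c : Char) (acc : List Char) :
    pvStepA (pre ++ c :: rest) acc ((pre.length : Int), c) =
      acc ++ (if pvUnd pre.getLast? c rest.head? then ['_'] else []) ++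
        [PySem.Chars.lowerChar c] := by
  by_cases huc : PySem.Chars.isupper c = true
  case neg => simp [pvStepA, huc, pvUnd, List.append_assoc]
  rcases List.eq_nil_or_concat pre with rfl | ⟨pre', q, rfl⟩
  · simp [pvStepA, pvUnd, huc]
  simp only [List.concat_eq_append]
  have hprev : PySem.List.pyGetD ((pre' ++ [q]) ++ c :: rest)
      ((((pre' ++ [q]).length : Nat) : Int) - 1) ' ' = q := by
    rw [show ((((pre' ++ [q]).length : Nat) : Int) - 1) = ((pre'.length : Nat) : Int) by simp,
      PySem.List.pyGetD_natCast,
      show (pre' ++ [q]) ++ c :: rest = pre' ++ (q :: c :: rest) by simp,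
      List.getD_append_right _ _ _ _ (Nat.le_refl _)]
    simp
  cases rest with
  | nil =>
    have hlt : ¬ ((((pre' ++ [q]).length : Nat) : Int) + 1 <
        (((pre' ++ [q]) ++ c :: ([] : List Char)).length : Int)) := by
      simp; omega
    simp only [pvStepA, huc, Bool.true_and, hprev, if_neg hlt]
    simp [pvUnd, huc, List.getLast?_concat, List.append_assoc]
    split <;> simp
  | cons d rest' =>
    have hlt : ((((pre' ++ [q]).length : Nat) : Int) + 1 <
        (((pre' ++ [q]) ++ c :: d :: rest').length : Int)) := by
      simp; omega
    have hnext : PySem.List.pyGetD ((pre' ++ [q]) ++ c :: d :: rest')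
        ((((pre' ++ [q]).length : Nat) : Int) + 1) ' ' = d := by
      rw [show ((((pre' ++ [q]).length : Nat) : Int) + 1) = (((pre' ++ [q, c]).length : Nat) : Int) by simp; omega,
        PySem.List.pyGetD_natCast,
        show (pre' ++ [q]) ++ c :: d :: rest' = (pre' ++ [q, c]) ++ (d :: rest') by simp,
        List.getD_append_right _ _ _ _ (Nat.le_refl _)]
      simp
    simp only [pvStepA, huc, Bool.true_and, hprev, if_pos hlt, hnext]
    simp [pvUnd, huc, List.getLast?_concat, List.append_assoc]
    split <;> simp

theorem pvFoldA (cs suf : List Char) : ∀ (pre acc : List Char),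
    pre ++ suf = cs →
    (PySem.List.enumerate suf ((pre.length : Int))).foldl (pvStepA cs) acc =
      acc ++ pvRef pre.getLast? suf := by
  induction suf with
  | nil => intro pre acc _; simp [PySem.List.enumerate_nil, pvRef]
  | cons c rest ih =>
    intro pre acc h
    subst h
    rw [PySem.List.enumerate_cons, List.foldl_cons]
    have hlen : ((pre.length : Int) + 1) = (((pre ++ [c]).length : Nat) : Int) := by
      simp
    rw [pvStepA_spec pre rest c acc, hlen,
      ih (pre ++ [c]) _ (by simp)]
    simp [pvRef, List.getLast?_concat, List.append_assoc]

theorem pvA_eq_ref (value : String) :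
    title_case_to_snake_case value = String.ofList (pvRef none value.toList) := by
  have := pvFoldA value.toList value.toList [] [] rfl
  simpa [title_case_to_snake_case] using congrArg String.ofList this

-- ===== VERDICT (by name: the statement is the Claim_ definition above) =====
theorem title_case_to_snake_case_spec : Claim_equal_title_case_to_snake_case := by
  intro value _
  show _ = _
  rw [pvA_eq_ref]
  simp only [title_case_to_snake_case_alt, pvPass1_eq_g1, pvPass2_eq_g2,
    PySem.Str.lower, String.toList_ofList]
  rw [pv_lower_g2_g1 value.toList none]
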